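-- pv_equiv track=rewrite | github.com/AlonsoCh25/Trabajos-Intro-y-Taller-de-Progra | Kenneth/Introduccion a la Programación/Tarea 2 Intro a la programación..py | conttext_aux
-- ===== SOURCE A (Python) =====
-- def conttext_aux(texto, contador):
--     if texto == "":
--         return 0
--     if texto[0] == 'a':
--         return conttext_aux(texto[1:], contador)
--     if texto[0] == 'e':
--         return conttext_aux(texto[1:], contador)
--     if texto[0] == 'i':
--         return conttext_aux(texto[1:], contador)
--     if texto[0] == 'o':
--         return conttext_aux(texto[1:], contador)
--     if texto[0] == 'u':
--         return conttext_aux(texto[1:], contador)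
--     else: return (contador+1) + conttext_aux(texto[1:], contador)
-- ===== SOURCE B (Python) =====
-- def conttext_aux(texto, contador):
--     return (contador + 1) * sum(1 for c in texto if c not in 'aeiou')
-- ===== Notes on version B (the rewrite author's own statement) =====
-- stated objective: faster
-- what changed: Replaced the quadratic character-by-character recursion (each step slicing texto[1:]) by a single linear pass counting non-vowels once and multiplying by (contador+1).
import Mathlib
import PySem

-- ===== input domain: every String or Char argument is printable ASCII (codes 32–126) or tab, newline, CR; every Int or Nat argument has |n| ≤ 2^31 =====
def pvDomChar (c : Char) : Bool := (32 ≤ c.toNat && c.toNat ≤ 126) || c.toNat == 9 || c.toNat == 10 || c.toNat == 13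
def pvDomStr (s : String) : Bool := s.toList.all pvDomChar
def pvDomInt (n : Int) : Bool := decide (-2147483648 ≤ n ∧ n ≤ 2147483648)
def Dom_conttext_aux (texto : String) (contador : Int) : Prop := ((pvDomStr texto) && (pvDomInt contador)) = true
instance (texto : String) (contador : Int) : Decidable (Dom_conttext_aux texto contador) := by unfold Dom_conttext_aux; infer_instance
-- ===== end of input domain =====

-- B replaces A's quadratic slicing recursion by one linear pass counting non-vowels, multiplied by (contador+1).

-- ===== PORT A =====
-- A's recursion, step for step, on the character list (texto[1:] = tail).
def conttextA (l : List Char) (contador : Int) : Int :=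
  match l with
  | [] => 0
  | c :: rest =>
    if c = 'a' then conttextA rest contador
    else if c = 'e' then conttextA rest contador
    else if c = 'i' then conttextA rest contador
    else if c = 'o' then conttextA rest contador
    else if c = 'u' then conttextA rest contador
    else (contador + 1) + conttextA rest contador

def conttext_aux (texto : String) (contador : Int) : Int :=
  conttextA texto.toList contador

-- ===== PORT B =====
-- single pass: count characters not in "aeiou", multiply once
def conttext_aux_alt (texto : String) (contador : Int) : Int :=
  (contador + 1) * ((texto.toList.filter (fun c => ¬ c ∈ ['a','e','i','o','u'])).length : Int)

-- ===== PRECONDITION & SPEC =====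
def Spec_conttext_aux (texto : String) (contador : Int) (out : Int) : Prop := out = conttext_aux_alt texto contador
instance (texto : String) (contador : Int) (out : Int) : Decidable (Spec_conttext_aux texto contador out) := by unfold Spec_conttext_aux; infer_instance

-- ===== CLAIM (what is proved, stated in full; the proofs are below) =====
def Claim_equal_conttext_aux : Prop := ∀ (texto : String) (contador : Int), Dom_conttext_aux texto contador → Spec_conttext_aux texto contador (conttext_aux texto contador)

-- ===== LEMMAS AND PROOFS =====
theorem conttextA_eq (l : List Char) (contador : Int) :
    conttextA l contador
      = (contador + 1) * ((l.filter (fun c => ¬ c ∈ ['a','e','i','o','u'])).length : Int) := by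
  induction l with
  | nil => simp [conttextA]
  | cons c rest ih =>
    by_cases ha : c = 'a' <;> by_cases he : c = 'e' <;> by_cases hi : c = 'i' <;>
      by_cases ho : c = 'o' <;> by_cases hu : c = 'u' <;>
      simp_all [conttextA, List.filter] <;> ring

-- ===== VERDICT (by name: the statement is the Claim_ definition above) =====
theorem conttext_aux_spec : Claim_equal_conttext_aux := by
  intro texto contador _
  unfold Spec_conttext_aux conttext_aux conttext_aux_alt
  exact conttextA_eq _ _
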